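-- pv_equiv track=rewrite | github.com/Nok1sh/algorithms_hw3 | task19_hw3.py | func
-- ===== SOURCE A (Python) =====
-- def func(n, a, b):
--
--     first_album = []
--     second_album = []
--
--     for _ in range(n+1):
--         first_album.append([0] * (a+1))
--         second_album.append([0]*(b+1))
--
--     first_album[1][1] = 1
--     second_album[1][1] = 1
--
--     for i in range(2, n+1):
--
--         ending_2 = 0
--         for j in range(1, b+1):
--             ending_2 += second_album[i-1][j]
--
--         first_album[i][1] = ending_2
--
--         for j in range(2, a+1):
--             first_album[i][j] = first_album[i-1][j-1]
--
--         ending_1 = 0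
--         for j in range(1, a + 1):
--             ending_1 += first_album[i - 1][j]
--
--         second_album[i][1] = ending_1
--
--         for j in range(2, b + 1):
--             second_album[i][j] = second_album[i - 1][j - 1]
--
--     result = 0
--     for i in range(a+1):
--         result += first_album[n][i]
--     for i in range(b+1):
--         result += second_album[n][i]
--     return result % (10**9 + 7)
-- ===== SOURCE B (Python) =====
-- def func(n, a, b):
--     # O(n): track only per-length row sums S1/S2; the table rows are shifts,
--     # so each sum evolves by adding the other sum and dropping the fall-off term.
--     MOD = 10**9 + 7
--     S1 = [0] * (n + 1)
--     S2 = [0] * (n + 1)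
--     S1[1] = 1
--     S2[1] = 1
--     for i in range(2, n + 1):
--         k = i - 1
--         fall1 = S2[k - a] if k > a else (1 if k == a else 0)
--         fall2 = S1[k - b] if k > b else (1 if k == b else 0)
--         S1[i] = S2[k] + S1[k] - fall1
--         S2[i] = S1[k] + S2[k] - fall2
--     return (S1[n] + S2[n]) % MOD
-- ===== Notes on version B (the rewrite author's own statement) =====
-- stated objective: faster
-- what changed: Replaced the two (n+1)x(a+1)/(n+1)x(b+1) DP tables by two length-(n+1) arrays of row sums: each table row is a shift of the previous one, so the row sums satisfy S1[i]=S2[i-1]+S1[i-1]-fall1 where the fall-off term is read from the sum history, giving O(n) time independent of a and b.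
import Mathlib
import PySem

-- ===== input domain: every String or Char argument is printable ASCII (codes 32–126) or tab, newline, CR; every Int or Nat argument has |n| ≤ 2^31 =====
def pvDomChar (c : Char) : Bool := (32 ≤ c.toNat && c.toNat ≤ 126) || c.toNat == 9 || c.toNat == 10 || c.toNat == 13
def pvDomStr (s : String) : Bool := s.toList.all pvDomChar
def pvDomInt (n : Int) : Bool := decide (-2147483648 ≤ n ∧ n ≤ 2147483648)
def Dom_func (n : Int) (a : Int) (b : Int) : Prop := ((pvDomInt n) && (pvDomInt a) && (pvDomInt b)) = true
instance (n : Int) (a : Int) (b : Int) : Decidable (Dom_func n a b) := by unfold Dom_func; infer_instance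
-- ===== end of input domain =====

-- B replaces the two DP tables by two arrays of row sums updated with shift fall-off terms: O(n) instead of O(n*(a+b)).


-- ===== PORT A =====
-- Python lists are mutable O(1)-indexed vectors: ported as Array (list-valued in the signature types is unaffected)
-- xs[i] read with default (all reads are in range under Pre_func, where Python does not raise)
def pyGetI (xs : Array Int) (i : Int) : Int := xs.getD i.toNat 0
def pyGetL (xss : Array (Array Int)) (i : Int) : Array Int := xss.getD i.toNat #[]
-- xs[i] = v ; exact for the nonnegative in-range indices used under Pre_func
def pySetI (xs : Array Int) (i : Int) (v : Int) : Array Int := xs.setIfInBounds i.toNat v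
-- xss[i][j] = v
def pySet2 (xss : Array (Array Int)) (i j : Int) (v : Int) : Array (Array Int) :=
  xss.modify i.toNat (fun row => row.setIfInBounds j.toNat v)

-- the body of A's 'for i in range(2, n+1)' loop
def stepA (a b : Int) (st : Array (Array Int) × Array (Array Int)) (i : Int) :
    Array (Array Int) × Array (Array Int) :=
  let ending2 := (PySem.List.pyRange 1 (b+1)).foldl
      (fun acc j => acc + pyGetI (pyGetL st.2 (i-1)) j) 0
  let f := pySet2 st.1 i 1 ending2
  let f := (PySem.List.pyRange 2 (a+1)).foldl
      (fun f j => pySet2 f i j (pyGetI (pyGetL f (i-1)) (j-1))) f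
  let ending1 := (PySem.List.pyRange 1 (a+1)).foldl
      (fun acc j => acc + pyGetI (pyGetL f (i-1)) j) 0
  let s := pySet2 st.2 i 1 ending1
  let s := (PySem.List.pyRange 2 (b+1)).foldl
      (fun s j => pySet2 s i j (pyGetI (pyGetL s (i-1)) (j-1))) s
  (f, s)

def func (n : Int) (a : Int) (b : Int) : Int :=
  let first0 := (PySem.List.pyRange 0 (n+1)).foldl
      (fun acc _ => acc.push (Array.replicate (a+1).toNat (0:Int))) #[]
  let second0 := (PySem.List.pyRange 0 (n+1)).foldl
      (fun acc _ => acc.push (Array.replicate (b+1).toNat (0:Int))) #[]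
  let first0 := pySet2 first0 1 1 1
  let second0 := pySet2 second0 1 1 1
  let st := (PySem.List.pyRange 2 (n+1)).foldl (stepA a b) (first0, second0)
  let result := (PySem.List.pyRange 0 (a+1)).foldl
      (fun acc i2 => acc + pyGetI (pyGetL st.1 n) i2) 0
  let result := (PySem.List.pyRange 0 (b+1)).foldl
      (fun acc i2 => acc + pyGetI (pyGetL st.2 n) i2) result
  PySem.Int.mod result (10^9 + 7)

-- ===== PORT B =====
-- the body of B's 'for i in range(2, n+1)' loop
def stepB (a b : Int) (st : Array Int × Array Int) (i : Int) : Array Int × Array Int :=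
  let k := i - 1
  let fall1 := if a < k then pyGetI st.2 (k - a) else if k = a then 1 else 0
  let fall2 := if b < k then pyGetI st.1 (k - b) else if k = b then 1 else 0
  let s1 := pySetI st.1 i (pyGetI st.2 k + pyGetI st.1 k - fall1)
  let s2 := pySetI st.2 i (pyGetI s1 k + pyGetI st.2 k - fall2)
  (s1, s2)

def func_alt (n : Int) (a : Int) (b : Int) : Int :=
  let s1 := Array.replicate (n+1).toNat (0:Int)
  let s2 := Array.replicate (n+1).toNat (0:Int)
  let s1 := pySetI s1 1 1
  let s2 := pySetI s2 1 1
  let st := (PySem.List.pyRange 2 (n+1)).foldl (stepB a b) (s1, s2)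
  PySem.Int.mod (pyGetI st.1 n + pyGetI st.2 n) (10^9 + 7)

-- ===== PRECONDITION & SPEC =====
-- A raises IndexError unless n >= 1, a >= 1 and b >= 1 (the tables must have a row 1 and a column 1).
def Pre_func (n : Int) (a : Int) (b : Int) : Prop := 1 ≤ n ∧ 1 ≤ a ∧ 1 ≤ b
instance (n : Int) (a : Int) (b : Int) : Decidable (Pre_func n a b) := by unfold Pre_func; infer_instance
def pvWitness_func : Int × Int × Int := (5, 2, 3)

def Spec_func (n : Int) (a : Int) (b : Int) (out : Int) : Prop := out = func_alt n a b
instance (n : Int) (a : Int) (b : Int) (out : Int) : Decidable (Spec_func n a b out) := by unfold Spec_func; infer_instance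

-- ===== CLAIM (what is proved, stated in full; the proofs are below) =====
def Claim_equal_func : Prop := ∀ (n : Int) (a : Int) (b : Int), Dom_func n a b → Pre_func n a b → Spec_func n a b (func n a b)

-- ===== LEMMAS AND PROOFS =====
-- list-level models of the ports (proof-only; the ports themselves use Array like Python's lists)
def pvGetI (xs : List Int) (i : Int) : Int := PySem.List.pyGetD xs i 0
def pvGetL (xss : List (List Int)) (i : Int) : List Int := PySem.List.pyGetD xss i []
def pvSetI (xs : List Int) (i : Int) (v : Int) : List Int := xs.set i.toNat v
def pvSetL (xss : List (List Int)) (i : Int) (v : List Int) : List (List Int) := xss.set i.toNat v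
def pvSet2 (xss : List (List Int)) (i j : Int) (v : Int) : List (List Int) :=
  pvSetL xss i (pvSetI (pvGetL xss i) j v)

def stepAL (a b : Int) (st : List (List Int) × List (List Int)) (i : Int) :
    List (List Int) × List (List Int) :=
  let ending2 := (PySem.List.pyRange 1 (b+1)).foldl
      (fun acc j => acc + pvGetI (pvGetL st.2 (i-1)) j) 0
  let f := pvSet2 st.1 i 1 ending2
  let f := (PySem.List.pyRange 2 (a+1)).foldl
      (fun f j => pvSet2 f i j (pvGetI (pvGetL f (i-1)) (j-1))) f
  let ending1 := (PySem.List.pyRange 1 (a+1)).foldl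
      (fun acc j => acc + pvGetI (pvGetL f (i-1)) j) 0
  let s := pvSet2 st.2 i 1 ending1
  let s := (PySem.List.pyRange 2 (b+1)).foldl
      (fun s j => pvSet2 s i j (pvGetI (pvGetL s (i-1)) (j-1))) s
  (f, s)

def initAL (n a b : Int) : List (List Int) × List (List Int) :=
  (pvSet2 ((PySem.List.pyRange 0 (n+1)).foldl
      (fun acc _ => acc ++ [List.replicate (a+1).toNat (0:Int)]) []) 1 1 1,
   pvSet2 ((PySem.List.pyRange 0 (n+1)).foldl
      (fun acc _ => acc ++ [List.replicate (b+1).toNat (0:Int)]) []) 1 1 1)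

def funcL (n : Int) (a : Int) (b : Int) : Int :=
  let st := (PySem.List.pyRange 2 (n+1)).foldl (stepAL a b) (initAL n a b)
  let result := (PySem.List.pyRange 0 (a+1)).foldl
      (fun acc i2 => acc + pvGetI (pvGetL st.1 n) i2) 0
  let result := (PySem.List.pyRange 0 (b+1)).foldl
      (fun acc i2 => acc + pvGetI (pvGetL st.2 n) i2) result
  PySem.Int.mod result (10^9 + 7)

def stepBL (a b : Int) (st : List Int × List Int) (i : Int) : List Int × List Int :=
  let k := i - 1
  let fall1 := if a < k then pvGetI st.2 (k - a) else if k = a then 1 else 0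
  let fall2 := if b < k then pvGetI st.1 (k - b) else if k = b then 1 else 0
  let s1 := pvSetI st.1 i (pvGetI st.2 k + pvGetI st.1 k - fall1)
  let s2 := pvSetI st.2 i (pvGetI s1 k + pvGetI st.2 k - fall2)
  (s1, s2)

def funcL_alt (n : Int) (a : Int) (b : Int) : Int :=
  let s1 := pvSetI (List.replicate (n+1).toNat (0:Int)) 1 1
  let s2 := pvSetI (List.replicate (n+1).toNat (0:Int)) 1 1
  let st := (PySem.List.pyRange 2 (n+1)).foldl (stepBL a b) (s1, s2)
  PySem.Int.mod (pvGetI st.1 n + pvGetI st.2 n) (10^9 + 7)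


-- getD/set helper lemmas
theorem pvGetD_set_eq {α : Type} (xs : List α) (k : Nat) (v d : α) (h : k < xs.length) :
    (xs.set k v).getD k d = v := by
  rw [List.getD_eq_getElem _ _ (by simpa using h)]
  simp

theorem pvGetD_set_ne {α : Type} (xs : List α) (k r : Nat) (v d : α) (h : r ≠ k) :
    (xs.set k v).getD r d = xs.getD r d := by
  simp [List.getD_eq_getElem?_getD, List.getElem?_set_ne (by omega : k ≠ r)]

theorem pvGetD_replicate {α : Type} (k r : Nat) (d : α) :
    (List.replicate k d).getD r d = d := by
  simp [List.getD_eq_getElem?_getD, List.getElem?_replicate]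
  split <;> rfl

theorem pvPyGetD_toNat {α : Type} (xs : List α) (i : Int) (d : α) (h0 : 0 ≤ i)
    (h : i.toNat < xs.length) : PySem.List.pyGetD xs i d = xs.getD i.toNat d := by
  rw [PySem.List.pyGetD_eq_getElem xs d h0 (by omega), List.getD_eq_getElem _ _ h]

theorem pvFoldlAdd (l : List Int) (init : Int) :
    l.foldl (· + ·) init = init + l.sum := by
  induction l generalizing init with
  | nil => simp
  | cons x l ih => simp [List.foldl_cons, ih]; ring

-- the mathematical rows: (rowsQ a' b' m).1 / .2 are row (m+1) of the two DP tables, columns 1..a' / 1..b'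
def rowsQ (a' b' : Nat) : Nat → List Int × List Int
  | 0 => (1 :: List.replicate (a' - 1) 0, 1 :: List.replicate (b' - 1) 0)
  | m+1 => ((rowsQ a' b' m).2.sum :: (rowsQ a' b' m).1.dropLast,
            (rowsQ a' b' m).1.sum :: (rowsQ a' b' m).2.dropLast)

theorem rowsQ_swap (a' b' m : Nat) : rowsQ b' a' m = ((rowsQ a' b' m).2, (rowsQ a' b' m).1) := by
  induction m with
  | zero => rfl
  | succ m ih => simp [rowsQ, ih]

theorem rowsQ_len_fst (a' b' : Nat) (ha : 1 ≤ a') (m : Nat) : (rowsQ a' b' m).1.length = a' := by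
  induction m with
  | zero => simp [rowsQ]; omega
  | succ m ih => simp [rowsQ, List.length_dropLast, ih]; omega

theorem rowsQ_len_snd (a' b' : Nat) (hb : 1 ≤ b') (m : Nat) : (rowsQ a' b' m).2.length = b' := by
  have := rowsQ_len_fst b' a' hb m
  rwa [rowsQ_swap] at this

def hF (a' b' : Nat) (t : Nat) : Int := if t = 0 then 1 else (rowsQ a' b' (t-1)).2.sum

theorem rowsQ_elem_fst (a' b' : Nat) (ha : 1 ≤ a') (m : Nat) : ∀ j : Nat, j < a' →
    (rowsQ a' b' m).1.getD j 0 = if j ≤ m then hF a' b' (m - j) else 0 := by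
  induction m with
  | zero =>
    intro j hj
    match j with
    | 0 => simp [rowsQ, hF]
    | j+1 =>
      simp only [rowsQ]
      rw [show ((1 : Int) :: List.replicate (a'-1) 0).getD (j+1) 0
            = (List.replicate (a'-1) (0:Int)).getD j 0 from rfl, pvGetD_replicate]
      simp
  | succ m ih =>
    intro j hj
    match j with
    | 0 => simp [rowsQ, hF]
    | j+1 =>
      have hlen : (rowsQ a' b' m).1.length = a' := rowsQ_len_fst a' b' ha m
      simp only [rowsQ]
      rw [show ((rowsQ a' b' m).2.sum :: (rowsQ a' b' m).1.dropLast).getD (j+1) 0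
            = (rowsQ a' b' m).1.dropLast.getD j 0 from rfl]
      by_cases hj2 : j + 1 < a'
      · have hjlt : j < (rowsQ a' b' m).1.dropLast.length := by
          simp [List.length_dropLast, hlen]; omega
        rw [List.getD_eq_getElem _ _ hjlt, List.getElem_dropLast,
            ← List.getD_eq_getElem _ 0 (by simp [hlen]; omega : j < (rowsQ a' b' m).1.length),
            ih j (by omega)]
        rw [show m + 1 - (j+1) = m - j from by omega]
        by_cases hjm : j ≤ m
        · rw [if_pos hjm, if_pos (by omega)]
        · rw [if_neg hjm, if_neg (by omega)]
      · -- j + 1 = a' is the last column: getD out of range of dropLast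
        have : (rowsQ a' b' m).1.dropLast.length ≤ j := by
          simp [List.length_dropLast, hlen]; omega
        omega

theorem rowsQ_sum_fst_succ (a' b' : Nat) (ha : 1 ≤ a') (m : Nat) :
    (rowsQ a' b' (m+1)).1.sum
      = (rowsQ a' b' m).2.sum + ((rowsQ a' b' m).1.sum - (rowsQ a' b' m).1.getD (a'-1) 0) := by
  have hlen : (rowsQ a' b' m).1.length = a' := rowsQ_len_fst a' b' ha m
  have hne : (rowsQ a' b' m).1 ≠ [] := by
    intro h; rw [h] at hlen; simp at hlen; omega
  have hsplit : (rowsQ a' b' m).1.dropLast.sum + (rowsQ a' b' m).1.getD (a'-1) 0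
      = (rowsQ a' b' m).1.sum := by
    conv_rhs => rw [← List.dropLast_append_getLast hne]
    rw [List.sum_append, List.sum_cons, List.sum_nil,
        List.getLast_eq_getElem, List.getD_eq_getElem _ _ (by omega : a' - 1 < (rowsQ a' b' m).1.length)]
    simp [hlen]
  simp only [rowsQ, List.sum_cons]
  omega

-- the fall-off term read by B, in closed form
theorem rowsQ_fall_fst (a' b' : Nat) (ha : 1 ≤ a') (m' : Nat) (hm : 1 ≤ m') :
    (rowsQ a' b' (m'-1)).1.getD (a'-1) 0
      = if a' < m' then (rowsQ a' b' (m'-a'-1)).2.sum else if m' = a' then 1 else 0 := by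
  rw [rowsQ_elem_fst a' b' ha (m'-1) (a'-1) (by omega)]
  by_cases h1 : a' < m'
  · rw [if_pos (by omega), if_pos h1]
    simp [hF, show ¬ (m' - 1 - (a'-1) = 0) from by omega, show m' - 1 - (a'-1) - 1 = m' - a' - 1 from by omega]
  · by_cases h2 : m' = a'
    · rw [if_pos (by omega), if_neg h1, if_pos h2]
      simp [hF, show m' - 1 - (a'-1) = 0 from by omega]
    · rw [if_neg (by omega), if_neg h1, if_neg h2]

-- the inner summation loop 'for j in range(1, w+1): acc += row[j]' on a row 0 :: g of length w+1
theorem pvSumRow (g : List Int) (c : Int) (hc : c = (g.length : Int) + 1) (init : Int) :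
    (PySem.List.pyRange 1 c).foldl (fun acc j => acc + pvGetI ((0:Int) :: g) j) init
      = init + g.sum := by
  have hc2 : c = (((0 :: g : List Int)).length : Int) := by simp [hc]
  rw [hc2]
  simp only [pvGetI]
  rw [PySem.List.foldl_pyRange_pyGetD' ((0:Int) :: g) 0 (fun acc x => acc + x) init
      (by norm_num : (0:Int) ≤ 1)]
  simp only [Int.toNat_one, List.drop_succ_cons, List.drop_zero]
  exact pvFoldlAdd g init

-- the inner shift loop on a single row, reading a FIXED previous row 0 :: p
theorem pvShiftRowAux (w : Nat) (p : List Int) (hp : p.length = w) (y : Int) :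
    ∀ m : Nat, m ≤ w - 1 →
    (PySem.List.pyRange 2 (2 + (m:Int))).foldl
        (fun r j => pvSetI r j (pvGetI ((0:Int) :: p) (j-1)))
        ((0:Int) :: y :: List.replicate (w-1) 0)
      = 0 :: y :: (p.take m ++ List.replicate (w-1-m) 0) := by
  intro m
  induction m with
  | zero =>
    intro _
    rw [PySem.List.pyRange_one_eq_nil (by norm_num)]
    simp
  | succ m ih =>
    intro hm
    rw [show (2 + ((m+1 : Nat) : Int)) = (2 + (m:Nat)) + 1 from by push_cast; ring,
        PySem.List.pyRange_one_succ_right (by omega), List.foldl_append, ih (by omega)]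
    simp only [List.foldl_cons, List.foldl_nil]
    have hv : pvGetI ((0:Int) :: p) (2 + (m:Int) - 1) = p[m]'(by omega) := by
      rw [pvGetI, pvPyGetD_toNat _ _ _ (by omega) (by simp only [List.length_cons, hp]; omega),
          show (2 + (m:Int) - 1).toNat = m + 1 from by omega]
      rw [show ((0:Int) :: p).getD (m+1) 0 = p.getD m 0 from rfl,
          List.getD_eq_getElem _ _ (by omega)]
    rw [hv, pvSetI, show ((2 + (m:Int))).toNat = m + 2 from by omega,
        List.set_cons_succ, List.set_cons_succ, List.set_append]
    rw [if_neg (by simp only [List.length_take, hp]; omega)]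
    rw [List.length_take, show min m p.length = m from by omega, Nat.sub_self,
        show w - 1 - m = (w - 1 - m - 1) + 1 from by omega, List.replicate_succ,
        List.set_cons_zero]
    have ht : List.take (m+1) p = List.take m p ++ [p[m]'(by omega)] := by
      rw [← List.take_concat_get (by omega : m < p.length), List.concat_eq_append]
    rw [ht, List.append_assoc]
    rfl

theorem pvShiftRow (w : Nat) (hw : 1 ≤ w) (p : List Int) (hp : p.length = w) (y : Int)
    (c : Int) (hc : c = (w:Int) + 1) :
    (PySem.List.pyRange 2 c).foldl
        (fun r j => pvSetI r j (pvGetI ((0:Int) :: p) (j-1)))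
        ((0:Int) :: y :: List.replicate (w-1) 0)
      = 0 :: y :: p.dropLast := by
  rw [hc, show ((w:Int)+1) = 2 + ((w-1 : Nat) : Int) from by push_cast [Nat.cast_sub hw]; ring,
      pvShiftRowAux w p hp y (w-1) le_rfl]
  simp [List.dropLast_eq_take, hp]

-- the table-level shift loop only ever rewrites row v and reads the unchanged row v-1
theorem pvShiftTable (v : Int) (hv : 2 ≤ v) (js : List Int) :
    ∀ (f0 : List (List Int)) (r : List Int), v.toNat < f0.length →
    js.foldl (fun f j => pvSet2 f v j (pvGetI (pvGetL f (v-1)) (j-1))) (pvSetL f0 v r)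
      = pvSetL f0 v (js.foldl (fun r j => pvSetI r j (pvGetI (pvGetL f0 (v-1)) (j-1))) r) := by
  induction js with
  | nil => intro f0 r h; rfl
  | cons j js ih =>
    intro f0 r h
    simp only [List.foldl_cons]
    have hgetprev : pvGetL (pvSetL f0 v r) (v-1) = pvGetL f0 (v-1) := by
      rw [pvGetL, pvGetL, pvSetL,
          pvPyGetD_toNat _ _ _ (by omega) (by simpa using (by omega : (v-1).toNat < f0.length)),
          pvPyGetD_toNat _ _ _ (by omega) (by omega),
          pvGetD_set_ne _ _ _ _ _ (by omega)]
    have hgetself : pvGetL (pvSetL f0 v r) v = r := by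
      rw [pvGetL, pvSetL, pvPyGetD_toNat _ _ _ (by omega) (by simpa using h),
          pvGetD_set_eq _ _ _ _ h]
    rw [show pvSet2 (pvSetL f0 v r) v j (pvGetI (pvGetL (pvSetL f0 v r) (v-1)) (j-1))
          = pvSetL f0 v (pvSetI r j (pvGetI (pvGetL f0 (v-1)) (j-1))) from by
        rw [pvSet2, hgetprev, hgetself, pvSetL, pvSetL, pvSetL, List.set_set]]
    rw [ih f0 (pvSetI r j (pvGetI (pvGetL f0 (v-1)) (j-1))) h]

theorem pvGetD_replicate_lt {α : Type} (k r : Nat) (d c : α) (h : r < k) :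
    (List.replicate k c).getD r d = c := by
  rw [List.getD_eq_getElem _ _ (by simpa using h)]; simp

theorem pvSetRep (w : Nat) (hw : 1 ≤ w) (y : Int) :
    pvSetI (List.replicate (w+1) (0:Int)) 1 y = 0 :: y :: List.replicate (w-1) 0 := by
  rw [pvSetI, show (1:Int).toNat = 1 from rfl, show w + 1 = (w-1) + 1 + 1 from by omega,
      List.replicate_succ, List.replicate_succ, List.set_cons_succ, List.set_cons_zero]

theorem pvSumRow0 (g : List Int) (c : Int) (hc : c = (g.length : Int) + 1) (init : Int) :
    (PySem.List.pyRange 0 c).foldl (fun acc j => acc + pvGetI ((0:Int) :: g) j) init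
      = init + g.sum := by
  have hc2 : c = (((0 :: g : List Int)).length : Int) := by simp [hc]
  rw [hc2]
  simp only [pvGetI]
  rw [PySem.List.foldl_pyRange_zero_pyGetD' ((0:Int) :: g) 0 (fun acc x => acc + x) init]
  rw [pvFoldlAdd ((0:Int) :: g) init]
  simp

-- 'table[v][1] = y' followed by the shift loop writes row v := 0 :: y :: prev.dropLast
theorem rowUpdate (v : Int) (hv : 2 ≤ v) (t : List (List Int)) (w : Nat) (hw : 1 ≤ w)
    (hlen : v.toNat < t.length) (prev : List Int)
    (hprev : pvGetL t (v-1) = 0 :: prev) (hplen : prev.length = w)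
    (hcur : pvGetL t v = List.replicate (w+1) 0) (y : Int) (c : Int) (hc : c = (w:Int)+1) :
    (PySem.List.pyRange 2 c).foldl
        (fun f j => pvSet2 f v j (pvGetI (pvGetL f (v-1)) (j-1))) (pvSet2 t v 1 y)
      = pvSetL t v (0 :: y :: prev.dropLast) := by
  have h1 : pvSet2 t v 1 y = pvSetL t v ((0:Int) :: y :: List.replicate (w-1) 0) := by
    rw [pvSet2, hcur, pvSetRep w hw y]
  rw [h1, pvShiftTable v hv _ t _ hlen, hprev, pvShiftRow w hw prev hplen y c hc]

-- invariant for A's tables: rows 1..i are the DP rows, the rest are still all-zero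
def InvT (n' w : Nat) (rows : Nat → List Int) (i : Nat) (t : List (List Int)) : Prop :=
  t.length = n' + 1 ∧ ∀ r : Nat, r < n' + 1 →
    t.getD r [] = if 1 ≤ r ∧ r ≤ i then 0 :: rows (r-1) else List.replicate (w+1) 0

theorem InvT_set (n' w : Nat) (rows : Nat → List Int) (i : Nat) (t : List (List Int))
    (h : InvT n' w rows i t) (v : Int) (hv : v.toNat = i + 1) :
    InvT n' w rows (i+1) (pvSetL t v (0 :: rows i)) := by
  obtain ⟨hl, hr⟩ := h
  refine ⟨by simp [pvSetL, hl], ?_⟩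
  intro r hrn
  rw [pvSetL, hv]
  by_cases he : r = i + 1
  · subst he
    rw [pvGetD_set_eq _ _ _ _ (by rw [hl]; omega), if_pos ⟨by omega, le_rfl⟩,
        show i + 1 - 1 = i from by omega]
  · rw [pvGetD_set_ne _ _ _ _ _ he, hr r hrn]
    by_cases hc : 1 ≤ r ∧ r ≤ i
    · rw [if_pos hc, if_pos ⟨hc.1, by omega⟩]
    · rw [if_neg hc, if_neg (by omega)]

theorem stepAL_eq (n a b : Int) (ha : 1 ≤ a) (hb : 1 ≤ b)
    (v : Int) (hv2 : 2 ≤ v) (hvn : v ≤ n)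
    (st : List (List Int) × List (List Int))
    (hf : InvT n.toNat a.toNat (fun t => (rowsQ a.toNat b.toNat t).1) (v-1).toNat st.1)
    (hg : InvT n.toNat b.toNat (fun t => (rowsQ a.toNat b.toNat t).2) (v-1).toNat st.2) :
    stepAL a b st v
      = (pvSetL st.1 v (0 :: (rowsQ a.toNat b.toNat (v.toNat - 1)).1),
         pvSetL st.2 v (0 :: (rowsQ a.toNat b.toNat (v.toNat - 1)).2)) := by
  obtain ⟨hfl, hfr⟩ := hf
  obtain ⟨hgl, hgr⟩ := hg
  have hlenF : (rowsQ a.toNat b.toNat (v.toNat - 2)).1.length = a.toNat :=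
    rowsQ_len_fst _ _ (by omega) _
  have hlenG : (rowsQ a.toNat b.toNat (v.toNat - 2)).2.length = b.toNat :=
    rowsQ_len_snd _ _ (by omega) _
  have hrowf : pvGetL st.1 (v-1) = 0 :: (rowsQ a.toNat b.toNat (v.toNat - 2)).1 := by
    rw [pvGetL, pvPyGetD_toNat _ _ _ (by omega) (by rw [hfl]; omega),
        hfr (v-1).toNat (by omega), if_pos ⟨by omega, le_rfl⟩]
    simp only [show (v-1).toNat - 1 = v.toNat - 2 from by omega]
  have hrowfv : pvGetL st.1 v = List.replicate (a.toNat+1) 0 := by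
    rw [pvGetL, pvPyGetD_toNat _ _ _ (by omega) (by rw [hfl]; omega),
        hfr v.toNat (by omega), if_neg (by omega)]
  have hrowg : pvGetL st.2 (v-1) = 0 :: (rowsQ a.toNat b.toNat (v.toNat - 2)).2 := by
    rw [pvGetL, pvPyGetD_toNat _ _ _ (by omega) (by rw [hgl]; omega),
        hgr (v-1).toNat (by omega), if_pos ⟨by omega, le_rfl⟩]
    simp only [show (v-1).toNat - 1 = v.toNat - 2 from by omega]
  have hrowgv : pvGetL st.2 v = List.replicate (b.toNat+1) 0 := by
    rw [pvGetL, pvPyGetD_toNat _ _ _ (by omega) (by rw [hgl]; omega),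
        hgr v.toNat (by omega), if_neg (by omega)]
  simp only [stepAL]
  rw [hrowg]
  rw [pvSumRow _ (b+1) (by rw [hlenG]; omega) 0, zero_add]
  rw [rowUpdate v hv2 st.1 a.toNat (by omega) (by rw [hfl]; omega) _ hrowf hlenF hrowfv
      _ (a+1) (by omega)]
  rw [show (0:Int) :: (rowsQ a.toNat b.toNat (v.toNat-2)).2.sum
        :: (rowsQ a.toNat b.toNat (v.toNat-2)).1.dropLast
        = 0 :: (rowsQ a.toNat b.toNat (v.toNat-1)).1 from by
      rw [show v.toNat - 1 = (v.toNat - 2) + 1 from by omega]; simp [rowsQ]]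
  have hrowf2 : pvGetL (pvSetL st.1 v (0 :: (rowsQ a.toNat b.toNat (v.toNat-1)).1)) (v-1)
      = 0 :: (rowsQ a.toNat b.toNat (v.toNat - 2)).1 := by
    rw [pvGetL, pvSetL, pvPyGetD_toNat _ _ _ (by omega) (by simp only [List.length_set]; rw [hfl]; omega),
        pvGetD_set_ne _ _ _ _ _ (by omega)]
    rw [pvGetL, pvPyGetD_toNat _ _ _ (by omega) (by rw [hfl]; omega)] at hrowf
    exact hrowf
  rw [hrowf2]
  rw [pvSumRow _ (a+1) (by rw [hlenF]; omega) 0, zero_add]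
  rw [rowUpdate v hv2 st.2 b.toNat (by omega) (by rw [hgl]; omega) _ hrowg hlenG hrowgv
      _ (b+1) (by omega)]
  rw [show (0:Int) :: (rowsQ a.toNat b.toNat (v.toNat-2)).1.sum
        :: (rowsQ a.toNat b.toNat (v.toNat-2)).2.dropLast
        = 0 :: (rowsQ a.toNat b.toNat (v.toNat-1)).2 from by
      rw [show v.toNat - 1 = (v.toNat - 2) + 1 from by omega]; simp [rowsQ]]

theorem initTable (n c : Int) (hn : 1 ≤ n) (hc : 1 ≤ c) (rows : Nat → List Int)
    (hrow0 : rows 0 = 1 :: List.replicate (c.toNat - 1) 0) :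
    InvT n.toNat c.toNat rows 1
      (pvSet2 ((PySem.List.pyRange 0 (n+1)).foldl
        (fun acc _ => acc ++ [List.replicate (c+1).toNat (0:Int)]) []) 1 1 1) := by
  have hT : (PySem.List.pyRange 0 (n+1)).foldl
      (fun acc _ => acc ++ [List.replicate (c+1).toNat (0:Int)]) []
      = List.replicate (n.toNat+1) (List.replicate (c.toNat+1) 0) := by
    rw [PySem.List.foldl_append_singleton_eq_map (fun _ => List.replicate (c+1).toNat (0:Int)) _ []]
    rw [List.map_const', PySem.List.length_pyRange_one,
        show ((n+1) - 0).toNat = n.toNat + 1 from by omega,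
        show (c+1).toNat = c.toNat + 1 from by omega, List.nil_append]
  rw [hT, pvSet2]
  have hg : pvGetL (List.replicate (n.toNat+1) (List.replicate (c.toNat+1) (0:Int))) 1
      = List.replicate (c.toNat+1) 0 := by
    rw [pvGetL, pvPyGetD_toNat _ _ _ (by omega) (by simp; omega),
        show (1:Int).toNat = 1 from rfl, pvGetD_replicate_lt _ _ _ _ (by omega)]
  rw [hg, pvSetRep c.toNat (by omega) 1]
  constructor
  · simp [pvSetL]
  · intro r hrn
    rw [pvSetL, show (1:Int).toNat = 1 from rfl]
    by_cases he : r = 1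
    · subst he
      rw [pvGetD_set_eq _ _ _ _ (by simp; omega), if_pos ⟨le_rfl, le_rfl⟩, hrow0]
    · rw [pvGetD_set_ne _ _ _ _ _ he, pvGetD_replicate_lt _ _ _ _ (by omega), if_neg (by omega)]

theorem loopA (n a b : Int) (hn : 1 ≤ n) (ha : 1 ≤ a) (hb : 1 ≤ b) :
    ∀ m : Int, 1 ≤ m → m ≤ n →
    InvT n.toNat a.toNat (fun t => (rowsQ a.toNat b.toNat t).1) m.toNat
        (((PySem.List.pyRange 2 (m+1)).foldl (stepAL a b) (initAL n a b)).1)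
    ∧ InvT n.toNat b.toNat (fun t => (rowsQ a.toNat b.toNat t).2) m.toNat
        (((PySem.List.pyRange 2 (m+1)).foldl (stepAL a b) (initAL n a b)).2) := by
  intro m h1
  induction m, h1 using Int.le_induction with
  | base =>
    intro _
    rw [show (1:Int)+1 = 2 from rfl, PySem.List.pyRange_one_eq_nil le_rfl, List.foldl_nil,
        show (1:Int).toNat = 1 from rfl]
    constructor
    · exact initTable n a hn ha _ (by simp [rowsQ])
    · exact initTable n b hn hb _ (by simp [rowsQ])
  | succ m hm ih =>
    intro hmn
    obtain ⟨ihf, ihg⟩ := ih (by omega)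
    rw [PySem.List.pyRange_one_succ_right (by omega : (2:Int) ≤ m+1), List.foldl_append,
        List.foldl_cons, List.foldl_nil]
    rw [stepAL_eq n a b ha hb (m+1) (by omega) (by omega) _
        (by simpa [show (m+1-1 : Int) = m from by ring] using ihf)
        (by simpa [show (m+1-1 : Int) = m from by ring] using ihg)]
    rw [show ((m+1:Int)).toNat = m.toNat + 1 from by omega,
        show m.toNat + 1 - 1 = m.toNat from by omega]
    constructor
    · exact InvT_set _ _ _ _ _ ihf (m+1) (by omega)
    · exact InvT_set _ _ _ _ _ ihg (m+1) (by omega)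

theorem funcAL_eval (n a b : Int) (hn : 1 ≤ n) (ha : 1 ≤ a) (hb : 1 ≤ b) :
    funcL n a b = PySem.Int.mod
      ((rowsQ a.toNat b.toNat (n.toNat - 1)).1.sum + (rowsQ a.toNat b.toNat (n.toNat - 1)).2.sum)
      (10^9+7) := by
  obtain ⟨hf, hg⟩ := loopA n a b hn ha hb n hn le_rfl
  simp only [funcL]
  have hrowf : pvGetL ((PySem.List.pyRange 2 (n+1)).foldl (stepAL a b) (initAL n a b)).1 n
      = 0 :: (rowsQ a.toNat b.toNat (n.toNat - 1)).1 := by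
    rw [pvGetL, pvPyGetD_toNat _ _ _ (by omega) (by rw [hf.1]; omega),
        hf.2 n.toNat (by omega), if_pos ⟨by omega, le_rfl⟩]
  have hrowg : pvGetL ((PySem.List.pyRange 2 (n+1)).foldl (stepAL a b) (initAL n a b)).2 n
      = 0 :: (rowsQ a.toNat b.toNat (n.toNat - 1)).2 := by
    rw [pvGetL, pvPyGetD_toNat _ _ _ (by omega) (by rw [hg.1]; omega),
        hg.2 n.toNat (by omega), if_pos ⟨by omega, le_rfl⟩]
  rw [hrowf, hrowg,
      pvSumRow0 _ (a+1) (by rw [rowsQ_len_fst a.toNat b.toNat (by omega)]; omega) 0,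
      pvSumRow0 _ (b+1) (by rw [rowsQ_len_snd a.toNat b.toNat (by omega)]; omega) _,
      zero_add]

theorem rowsQ_sum_snd_succ (a' b' : Nat) (hb : 1 ≤ b') (m : Nat) :
    (rowsQ a' b' (m+1)).2.sum
      = (rowsQ a' b' m).1.sum + ((rowsQ a' b' m).2.sum - (rowsQ a' b' m).2.getD (b'-1) 0) := by
  have := rowsQ_sum_fst_succ b' a' hb m
  rw [rowsQ_swap a' b' (m+1), rowsQ_swap a' b' m] at this
  simpa using this

theorem rowsQ_fall_snd (a' b' : Nat) (hb : 1 ≤ b') (m' : Nat) (hm : 1 ≤ m') :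
    (rowsQ a' b' (m'-1)).2.getD (b'-1) 0
      = if b' < m' then (rowsQ a' b' (m'-b'-1)).1.sum else if m' = b' then 1 else 0 := by
  have := rowsQ_fall_fst b' a' hb m' hm
  rw [rowsQ_swap a' b' (m'-1), rowsQ_swap a' b' (m'-b'-1)] at this
  simpa using this

-- invariant for B's arrays: entries 1..i hold the row sums
def InvB (n' : Nat) (S : Nat → Int) (i : Nat) (s : List Int) : Prop :=
  s.length = n' + 1 ∧ ∀ k : Nat, 1 ≤ k → k ≤ i → s.getD k 0 = S k

theorem InvB_set (n' : Nat) (S : Nat → Int) (i : Nat) (s : List Int)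
    (h : InvB n' S i s) (hi : i + 1 ≤ n') (v : Int) (hv : v.toNat = i + 1) :
    InvB n' S (i+1) (pvSetI s v (S (i+1))) := by
  obtain ⟨hl, hr⟩ := h
  refine ⟨by simp [pvSetI, hl], ?_⟩
  intro k hk1 hk2
  rw [pvSetI, hv]
  by_cases he : k = i + 1
  · subst he; rw [pvGetD_set_eq _ _ _ _ (by rw [hl]; omega)]
  · rw [pvGetD_set_ne _ _ _ _ _ he, hr k hk1 (by omega)]

theorem stepBL_eq (n a b : Int) (ha : 1 ≤ a) (hb : 1 ≤ b)
    (v : Int) (hv2 : 2 ≤ v) (hvn : v ≤ n)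
    (st : List Int × List Int)
    (h1 : InvB n.toNat (fun t => (rowsQ a.toNat b.toNat (t-1)).1.sum) (v-1).toNat st.1)
    (h2 : InvB n.toNat (fun t => (rowsQ a.toNat b.toNat (t-1)).2.sum) (v-1).toNat st.2) :
    stepBL a b st v
      = (pvSetI st.1 v ((rowsQ a.toNat b.toNat (v.toNat - 1)).1.sum),
         pvSetI st.2 v ((rowsQ a.toNat b.toNat (v.toNat - 1)).2.sum)) := by
  obtain ⟨h1l, h1r⟩ := h1
  obtain ⟨h2l, h2r⟩ := h2
  have hk1 : pvGetI st.1 (v-1) = (rowsQ a.toNat b.toNat ((v-1).toNat - 1)).1.sum := by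
    rw [pvGetI, pvPyGetD_toNat _ _ _ (by omega) (by rw [h1l]; omega),
        h1r (v-1).toNat (by omega) le_rfl]
  have hk2 : pvGetI st.2 (v-1) = (rowsQ a.toNat b.toNat ((v-1).toNat - 1)).2.sum := by
    rw [pvGetI, pvPyGetD_toNat _ _ _ (by omega) (by rw [h2l]; omega),
        h2r (v-1).toNat (by omega) le_rfl]
  have hfall1 : (if a < v-1 then pvGetI st.2 (v-1-a) else if v-1 = a then 1 else 0)
      = (rowsQ a.toNat b.toNat ((v-1).toNat - 1)).1.getD (a.toNat - 1) 0 := by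
    rw [rowsQ_fall_fst a.toNat b.toNat (by omega) (v-1).toNat (by omega)]
    by_cases hc1 : a < v - 1
    · rw [if_pos hc1, if_pos (by omega : a.toNat < (v-1).toNat)]
      rw [pvGetI, pvPyGetD_toNat _ _ _ (by omega) (by rw [h2l]; omega),
          h2r (v-1-a).toNat (by omega) (by omega),
          show (v-1-a).toNat = (v-1).toNat - a.toNat from by omega,
          show (v-1).toNat - a.toNat - 1 = (v-1).toNat - a.toNat - 1 from rfl]
    · rw [if_neg hc1, if_neg (by omega : ¬ a.toNat < (v-1).toNat)]
      by_cases hc2 : v - 1 = a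
      · rw [if_pos hc2, if_pos (by omega)]
      · rw [if_neg hc2, if_neg (by omega)]
  have hfall2 : (if b < v-1 then pvGetI st.1 (v-1-b) else if v-1 = b then 1 else 0)
      = (rowsQ a.toNat b.toNat ((v-1).toNat - 1)).2.getD (b.toNat - 1) 0 := by
    rw [rowsQ_fall_snd a.toNat b.toNat (by omega) (v-1).toNat (by omega)]
    by_cases hc1 : b < v - 1
    · rw [if_pos hc1, if_pos (by omega : b.toNat < (v-1).toNat)]
      rw [pvGetI, pvPyGetD_toNat _ _ _ (by omega) (by rw [h1l]; omega),
          h1r (v-1-b).toNat (by omega) (by omega),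
          show (v-1-b).toNat = (v-1).toNat - b.toNat from by omega]
    · rw [if_neg hc1, if_neg (by omega : ¬ b.toNat < (v-1).toNat)]
      by_cases hc2 : v - 1 = b
      · rw [if_pos hc2, if_pos (by omega)]
      · rw [if_neg hc2, if_neg (by omega)]
  have hval1 : pvGetI st.2 (v-1) + pvGetI st.1 (v-1)
        - (rowsQ a.toNat b.toNat ((v-1).toNat - 1)).1.getD (a.toNat - 1) 0
      = (rowsQ a.toNat b.toNat (v.toNat - 1)).1.sum := by
    rw [hk1, hk2, show v.toNat - 1 = ((v-1).toNat - 1) + 1 from by omega,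
        rowsQ_sum_fst_succ a.toNat b.toNat (by omega)]
    ring
  have hk1' : pvGetI (pvSetI st.1 v ((rowsQ a.toNat b.toNat (v.toNat - 1)).1.sum)) (v-1)
      = (rowsQ a.toNat b.toNat ((v-1).toNat - 1)).1.sum := by
    rw [pvGetI, pvSetI,
        pvPyGetD_toNat _ _ _ (by omega) (by simp only [List.length_set]; rw [h1l]; omega),
        pvGetD_set_ne _ _ _ _ _ (by omega), h1r (v-1).toNat (by omega) le_rfl]
  have hval2 : pvGetI (pvSetI st.1 v ((rowsQ a.toNat b.toNat (v.toNat - 1)).1.sum)) (v-1)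
        + pvGetI st.2 (v-1)
        - (rowsQ a.toNat b.toNat ((v-1).toNat - 1)).2.getD (b.toNat - 1) 0
      = (rowsQ a.toNat b.toNat (v.toNat - 1)).2.sum := by
    rw [hk1', hk2, show v.toNat - 1 = ((v-1).toNat - 1) + 1 from by omega,
        rowsQ_sum_snd_succ a.toNat b.toNat (by omega)]
    ring
  simp only [stepBL]
  rw [hfall1, hval1, hfall2, hval2]

theorem loopB (n a b : Int) (hn : 1 ≤ n) (ha : 1 ≤ a) (hb : 1 ≤ b) :
    ∀ m : Int, 1 ≤ m → m ≤ n →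
    InvB n.toNat (fun t => (rowsQ a.toNat b.toNat (t-1)).1.sum) m.toNat
        (((PySem.List.pyRange 2 (m+1)).foldl (stepBL a b)
          (pvSetI (List.replicate (n+1).toNat (0:Int)) 1 1,
           pvSetI (List.replicate (n+1).toNat (0:Int)) 1 1)).1)
    ∧ InvB n.toNat (fun t => (rowsQ a.toNat b.toNat (t-1)).2.sum) m.toNat
        (((PySem.List.pyRange 2 (m+1)).foldl (stepBL a b)
          (pvSetI (List.replicate (n+1).toNat (0:Int)) 1 1,
           pvSetI (List.replicate (n+1).toNat (0:Int)) 1 1)).2) := by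
  have hinit : ∀ S : Nat → Int, S 1 = 1 →
      InvB n.toNat S 1 (pvSetI (List.replicate (n+1).toNat (0:Int)) 1 1) := by
    intro S hS
    refine ⟨by simp [pvSetI]; omega, ?_⟩
    intro k hk1 hk2
    rw [show k = 1 from by omega, pvSetI, show (1:Int).toNat = 1 from rfl,
        pvGetD_set_eq _ _ _ _ (by simp; omega), hS]
  intro m h1
  induction m, h1 using Int.le_induction with
  | base =>
    intro _
    rw [show (1:Int)+1 = 2 from rfl, PySem.List.pyRange_one_eq_nil le_rfl, List.foldl_nil,
        show (1:Int).toNat = 1 from rfl]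
    constructor
    · exact hinit _ (by simp [rowsQ])
    · exact hinit _ (by simp [rowsQ])
  | succ m hm ih =>
    intro hmn
    obtain ⟨ihf, ihg⟩ := ih (by omega)
    rw [PySem.List.pyRange_one_succ_right (by omega : (2:Int) ≤ m+1), List.foldl_append,
        List.foldl_cons, List.foldl_nil]
    rw [stepBL_eq n a b ha hb (m+1) (by omega) (by omega) _
        (by simpa [show (m+1-1 : Int) = m from by ring] using ihf)
        (by simpa [show (m+1-1 : Int) = m from by ring] using ihg)]
    rw [show ((m+1:Int)).toNat = m.toNat + 1 from by omega,
        show m.toNat + 1 - 1 = m.toNat + 1 - 1 from rfl]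
    constructor
    · have := InvB_set n.toNat (fun t => (rowsQ a.toNat b.toNat (t-1)).1.sum) m.toNat _
        ihf (by omega) (m+1) (by omega)
      simpa using this
    · have := InvB_set n.toNat (fun t => (rowsQ a.toNat b.toNat (t-1)).2.sum) m.toNat _
        ihg (by omega) (m+1) (by omega)
      simpa using this

theorem funcBL_eval (n a b : Int) (hn : 1 ≤ n) (ha : 1 ≤ a) (hb : 1 ≤ b) :
    funcL_alt n a b = PySem.Int.mod
      ((rowsQ a.toNat b.toNat (n.toNat - 1)).1.sum + (rowsQ a.toNat b.toNat (n.toNat - 1)).2.sum)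
      (10^9+7) := by
  obtain ⟨hf, hg⟩ := loopB n a b hn ha hb n hn le_rfl
  simp only [funcL_alt]
  rw [show pvGetI (((PySem.List.pyRange 2 (n+1)).foldl (stepBL a b)
        (pvSetI (List.replicate (n+1).toNat (0:Int)) 1 1,
         pvSetI (List.replicate (n+1).toNat (0:Int)) 1 1)).1) n
      = (rowsQ a.toNat b.toNat (n.toNat - 1)).1.sum from by
      rw [pvGetI, pvPyGetD_toNat _ _ _ (by omega) (by rw [hf.1]; omega),
          hf.2 n.toNat (by omega) le_rfl]]
  rw [show pvGetI (((PySem.List.pyRange 2 (n+1)).foldl (stepBL a b)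
        (pvSetI (List.replicate (n+1).toNat (0:Int)) 1 1,
         pvSetI (List.replicate (n+1).toNat (0:Int)) 1 1)).2) n
      = (rowsQ a.toNat b.toNat (n.toNat - 1)).2.sum from by
      rw [pvGetI, pvPyGetD_toNat _ _ _ (by omega) (by rw [hg.1]; omega),
          hg.2 n.toNat (by omega) le_rfl]]

-- ===== bridging: the Array ports compute the list models =====
def absT (t : Array (Array Int)) : List (List Int) := t.toList.map Array.toList

theorem pvFoldl_hom_mem {α₁ α₂ β : Type} (f : α₁ → α₂) (g₁ : α₁ → β → α₁)
    (g₂ : α₂ → β → α₂) (l : List β) (init : α₁)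
    (h : ∀ (x : α₁) (y : β), y ∈ l → g₂ (f x) y = f (g₁ x y)) :
    l.foldl g₂ (f init) = f (l.foldl g₁ init) := by
  induction l generalizing init with
  | nil => rfl
  | cons y t ih =>
    simp only [List.foldl_cons]
    rw [h init y (by simp)]
    exact ih _ (fun x z hz => h x z (by simp [hz]))

theorem absGetI (xs : Array Int) (i : Int) (h : 0 ≤ i) : pyGetI xs i = pvGetI xs.toList i := by
  rw [pyGetI, pvGetI, PySem.List.pyGetD_of_nonneg _ _ h, Array.getD_eq_getD_getElem?,
      List.getD_eq_getElem?_getD, Array.getElem?_toList]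

theorem absGetL (t : Array (Array Int)) (i : Int) (h : 0 ≤ i) :
    (pyGetL t i).toList = pvGetL (absT t) i := by
  rw [pyGetL, pvGetL, PySem.List.pyGetD_of_nonneg _ _ h, Array.getD_eq_getD_getElem?,
      List.getD_eq_getElem?_getD, absT, List.getElem?_map, Array.getElem?_toList]
  cases t[i.toNat]? <;> rfl

theorem absSetI (xs : Array Int) (i : Int) (v : Int) :
    (pySetI xs i v).toList = pvSetI xs.toList i v := by
  rw [pySetI, pvSetI, Array.toList_setIfInBounds]

theorem absSet2 (t : Array (Array Int)) (i j : Int) (v : Int) (hi : 0 ≤ i) :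
    absT (pySet2 t i j v) = pvSet2 (absT t) i j v := by
  rw [pySet2, pvSet2, pvSetL, pvSetI, pvGetL, PySem.List.pyGetD_of_nonneg _ _ hi]
  apply List.ext_getElem?
  intro m
  simp only [absT, List.getElem?_map, Array.toList_modify, List.getElem?_modify,
    List.getElem?_set]
  by_cases he : i.toNat = m
  · subst he
    cases hcell : t.toList[i.toNat]? with
    | none =>
      simp [hcell]
      have := List.getElem?_eq_none_iff.mp hcell
      simpa using this
    | some row =>
      have hlt : i.toNat < t.toList.length := by
        by_contra hcon
        rw [List.getElem?_eq_none (by omega)] at hcell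
        simp at hcell
      simp [hcell, Array.toList_setIfInBounds]
      simpa using hlt
  · cases t.toList[m]? <;> simp [he]

-- a summation loop over row t[k] is the same on the array as on its list image
theorem absSumFoldT (c lo : Int) (hlo : 0 ≤ lo) (t : Array (Array Int)) (k : Int) (hk : 0 ≤ k)
    (init : Int) :
    (PySem.List.pyRange lo c).foldl (fun acc j => acc + pyGetI (pyGetL t k) j) init
      = (PySem.List.pyRange lo c).foldl (fun acc j => acc + pvGetI (pvGetL (absT t) k) j) init := by
  apply PySem.List.foldl_congr_mem
  intro acc x hx
  rw [absGetI _ _ (le_trans hlo (PySem.List.mem_pyRange_one.mp hx).1), absGetL t k hk]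

theorem absShiftF (a i : Int) (hi : 2 ≤ i) (t : Array (Array Int)) (E : Int) :
    absT ((PySem.List.pyRange 2 (a+1)).foldl
        (fun f j => pySet2 f i j (pyGetI (pyGetL f (i-1)) (j-1))) (pySet2 t i 1 E))
      = (PySem.List.pyRange 2 (a+1)).foldl
        (fun f j => pvSet2 f i j (pvGetI (pvGetL f (i-1)) (j-1))) (pvSet2 (absT t) i 1 E) := by
  have hh := pvFoldl_hom_mem absT
      (fun f j => pySet2 f i j (pyGetI (pyGetL f (i-1)) (j-1)))
      (fun f j => pvSet2 f i j (pvGetI (pvGetL f (i-1)) (j-1)))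
      (PySem.List.pyRange 2 (a+1)) (pySet2 t i 1 E) ?_
  · rw [absSet2 t i 1 E (by omega)] at hh
    exact hh.symm
  · intro x y hy
    have hy2 : 2 ≤ y := (PySem.List.mem_pyRange_one.mp hy).1
    rw [absSet2 x i y _ (by omega), absGetI _ _ (by omega), absGetL _ _ (by omega)]

theorem stepA_absL (a b : Int) (st : Array (Array Int) × Array (Array Int)) (i : Int)
    (hi : 2 ≤ i) :
    (absT (stepA a b st i).1, absT (stepA a b st i).2) = stepAL a b (absT st.1, absT st.2) i := by
  simp only [stepA, stepAL]
  rw [absSumFoldT (b+1) 1 (by norm_num) st.2 (i-1) (by omega) 0]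
  rw [absSumFoldT (a+1) 1 (by norm_num) _ (i-1) (by omega) 0]
  rw [absShiftF a i hi st.1 _, absShiftF b i hi st.2 _]

theorem stepB_absL (a b : Int) (st : Array Int × Array Int) (i : Int) (hi : 2 ≤ i) :
    ((stepB a b st i).1.toList, (stepB a b st i).2.toList)
      = stepBL a b (st.1.toList, st.2.toList) i := by
  simp only [stepB, stepBL]
  have hf1 : (if a < i-1 then pyGetI st.2 (i-1-a) else if i-1 = a then 1 else 0)
      = (if a < i-1 then pvGetI st.2.toList (i-1-a) else if i-1 = a then 1 else 0) := by
    by_cases h : a < i-1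
    · rw [if_pos h, if_pos h, absGetI _ _ (by omega)]
    · rw [if_neg h, if_neg h]
  have hf2 : (if b < i-1 then pyGetI st.1 (i-1-b) else if i-1 = b then 1 else 0)
      = (if b < i-1 then pvGetI st.1.toList (i-1-b) else if i-1 = b then 1 else 0) := by
    by_cases h : b < i-1
    · rw [if_pos h, if_pos h, absGetI _ _ (by omega)]
    · rw [if_neg h, if_neg h]
  rw [hf1, hf2, absGetI st.2 (i-1) (by omega), absGetI st.1 (i-1) (by omega),
      absGetI _ (i-1) (by omega)]
  simp only [absSetI]

theorem funcA_abs (n a b : Int) (hn : 1 ≤ n) : func n a b = funcL n a b := by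
  have hinitFa : absT ((PySem.List.pyRange 0 (n+1)).foldl
        (fun acc _ => acc.push (Array.replicate (a+1).toNat (0:Int))) #[])
      = (PySem.List.pyRange 0 (n+1)).foldl
        (fun acc _ => acc ++ [List.replicate (a+1).toNat (0:Int)]) [] := by
    exact (pvFoldl_hom_mem absT _ _ _ #[] (by
      intro x y _
      simp [absT, Array.toList_push])).symm
  have hinitFb : absT ((PySem.List.pyRange 0 (n+1)).foldl
        (fun acc _ => acc.push (Array.replicate (b+1).toNat (0:Int))) #[])
      = (PySem.List.pyRange 0 (n+1)).foldl
        (fun acc _ => acc ++ [List.replicate (b+1).toNat (0:Int)]) [] := by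
    exact (pvFoldl_hom_mem absT _ _ _ #[] (by
      intro x y _
      simp [absT, Array.toList_push])).symm
  have hh := pvFoldl_hom_mem
      (fun p : Array (Array Int) × Array (Array Int) => (absT p.1, absT p.2))
      (stepA a b) (stepAL a b) (PySem.List.pyRange 2 (n+1))
      (pySet2 ((PySem.List.pyRange 0 (n+1)).foldl
          (fun acc _ => acc.push (Array.replicate (a+1).toNat (0:Int))) #[]) 1 1 1,
       pySet2 ((PySem.List.pyRange 0 (n+1)).foldl
          (fun acc _ => acc.push (Array.replicate (b+1).toNat (0:Int))) #[]) 1 1 1)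
      (by
        intro x y hy
        exact (stepA_absL a b x y (PySem.List.mem_pyRange_one.mp hy).1).symm)
  have hpair : (PySem.List.pyRange 2 (n+1)).foldl (stepAL a b) (initAL n a b)
      = ((fun p : Array (Array Int) × Array (Array Int) => (absT p.1, absT p.2))
          ((PySem.List.pyRange 2 (n+1)).foldl (stepA a b)
            (pySet2 ((PySem.List.pyRange 0 (n+1)).foldl
                (fun acc _ => acc.push (Array.replicate (a+1).toNat (0:Int))) #[]) 1 1 1,
             pySet2 ((PySem.List.pyRange 0 (n+1)).foldl
                (fun acc _ => acc.push (Array.replicate (b+1).toNat (0:Int))) #[]) 1 1 1))) := by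
    rw [← hh, initAL, ← hinitFa, ← hinitFb,
        ← absSet2 _ 1 1 1 (by norm_num), ← absSet2 _ 1 1 1 (by norm_num)]
  simp only [func, funcL]
  rw [absSumFoldT (a+1) 0 (by norm_num) _ n (by omega),
      absSumFoldT (b+1) 0 (by norm_num) _ n (by omega), hpair]

theorem funcB_abs (n a b : Int) (hn : 1 ≤ n) : func_alt n a b = funcL_alt n a b := by
  have hh := pvFoldl_hom_mem
      (fun p : Array Int × Array Int => (p.1.toList, p.2.toList))
      (stepB a b) (stepBL a b) (PySem.List.pyRange 2 (n+1))
      (pySetI (Array.replicate (n+1).toNat (0:Int)) 1 1,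
       pySetI (Array.replicate (n+1).toNat (0:Int)) 1 1)
      (by
        intro x y hy
        exact (stepB_absL a b x y (PySem.List.mem_pyRange_one.mp hy).1).symm)
  have hpair : (PySem.List.pyRange 2 (n+1)).foldl (stepBL a b)
        (pvSetI (List.replicate (n+1).toNat (0:Int)) 1 1,
         pvSetI (List.replicate (n+1).toNat (0:Int)) 1 1)
      = ((fun p : Array Int × Array Int => (p.1.toList, p.2.toList))
          ((PySem.List.pyRange 2 (n+1)).foldl (stepB a b)
            (pySetI (Array.replicate (n+1).toNat (0:Int)) 1 1,
             pySetI (Array.replicate (n+1).toNat (0:Int)) 1 1))) := by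
    rw [← hh]
    simp [absSetI]
  simp only [func_alt, funcL_alt]
  rw [absGetI _ n (by omega), absGetI _ n (by omega), hpair]

-- ===== VERDICT (by name: the statement is the Claim_ definition above) =====
theorem func_spec : Claim_equal_func := by
  intro n a b _ hpre
  obtain ⟨hn, ha, hb⟩ := hpre
  unfold Spec_func
  rw [funcA_abs n a b hn, funcB_abs n a b hn,
      funcAL_eval n a b hn ha hb, funcBL_eval n a b hn ha hb]
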